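-- pv_equiv track=rewrite | github.com/evz/greenland | comparison.py | mask_to_states
-- ===== SOURCE A (Python) =====
-- from typing import Dict, List, Tuple
--
-- def mask_to_states(mask: int, states: List[str]) -> List[str]:
--     out = []
--     i = 0
--     while mask:
--         lsb = mask & -mask
--         j = lsb.bit_length() - 1
--         out.append(states[j])
--         mask ^= lsb
--         i += 1
--     return out
-- ===== SOURCE B (Python) =====
-- from typing import List
--
-- def mask_to_states(mask: int, states: List[str]) -> List[str]:
--     return [states[i] for i in range(mask.bit_length()) if mask & (1 << i)]
-- ===== Notes on version B (the rewrite author's own statement) =====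
-- stated objective: idiomatic
-- what changed: B is a single comprehension over the bounded range of bit positions (range(mask.bit_length()), test mask & (1 << i)) instead of A's while-loop with mutable state that repeatedly isolates and xor-clears the lowest set bit (mask & -mask, bit_length).
import Mathlib
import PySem

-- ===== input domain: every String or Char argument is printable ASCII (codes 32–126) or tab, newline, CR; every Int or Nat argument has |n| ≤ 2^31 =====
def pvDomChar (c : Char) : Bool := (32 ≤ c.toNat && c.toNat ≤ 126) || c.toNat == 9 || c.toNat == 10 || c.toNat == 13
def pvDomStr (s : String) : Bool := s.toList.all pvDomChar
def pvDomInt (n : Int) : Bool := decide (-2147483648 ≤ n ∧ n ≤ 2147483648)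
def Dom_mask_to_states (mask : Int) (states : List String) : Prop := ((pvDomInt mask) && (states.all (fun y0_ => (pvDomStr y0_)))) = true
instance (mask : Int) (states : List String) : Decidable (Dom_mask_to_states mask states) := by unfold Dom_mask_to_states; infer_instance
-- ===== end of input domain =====

-- B replaces A's stateful while-loop (isolate lowest set bit with mask & -mask, xor-clear)
-- by a single comprehension over the bounded range of bit positions; same output (idiomatic).

-- ===== PORT A =====
-- Fuel-bounded transliteration of A's `while mask:` loop; fuel mask.toNat+1 suffices for every
-- mask ≥ 0 (each iteration strictly decreases the mask).  On masks outside Pre_ the Python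
-- raises IndexError on some states[j]; pyGetD's "" default there is never relied on.
-- `PySem.Int.band mask (-mask)` is Python's `mask & -mask`, `PySem.Int.bitLength _ - 1` is
-- `lsb.bit_length() - 1`, `PySem.Int.bxor` is `mask ^= lsb`.
def mtsLoopA (states : List String) : Nat → Int → Int → List String → List String
  | 0, _, _, out => out
  | fuel+1, mask, i, out =>
    if mask ≠ 0 then
      mtsLoopA states fuel (PySem.Int.bxor mask (PySem.Int.band mask (-mask))) (i + 1)
        (out ++ [PySem.List.pyGetD states ((PySem.Int.bitLength (PySem.Int.band mask (-mask)) - 1 : Nat) : Int) ""])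
    else out

def mask_to_states (mask : Int) (states : List String) : List String :=
  mtsLoopA states (mask.toNat + 1) mask 0 []

-- ===== PORT B =====
-- Transliteration of B's comprehension: range(mask.bit_length()) → filter on `mask & (1 << i)`
-- → map states[i].  `1 << i` is 2^i; i comes from pyRange 0 bl 1 so i ≥ 0 and i.toNat is exact.
def mask_to_states_alt (mask : Int) (states : List String) : List String :=
  (((PySem.List.pyRange 0 (PySem.Int.bitLength mask) 1).filter
      (fun i => PySem.Int.band mask ((2 : Int) ^ i.toNat) != 0)).map
    (fun i => PySem.List.pyGetD states i ""))

-- ===== PRECONDITION & SPEC =====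
-- Pre_ = exactly the inputs on which the Python A returns: a negative mask or any set bit at a
-- position ≥ len(states) makes A raise IndexError on some states[j].
def Pre_mask_to_states (mask : Int) (states : List String) : Prop :=
  0 ≤ mask ∧ mask < 2 ^ states.length

instance (mask : Int) (states : List String) : Decidable (Pre_mask_to_states mask states) := by
  unfold Pre_mask_to_states; infer_instance

def pvWitness_mask_to_states : Int × List String := (5, ["WA", "OR", "CA"])

def Spec_mask_to_states (mask : Int) (states : List String) (out : List String) : Prop := out = mask_to_states_alt mask states
instance (mask : Int) (states : List String) (out : List String) : Decidable (Spec_mask_to_states mask states out) := by unfold Spec_mask_to_states; infer_instance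

-- ===== CLAIM (what is proved, stated in full; the proofs are below) =====
def Claim_equal_mask_to_states : Prop := ∀ (mask : Int) (states : List String), Dom_mask_to_states mask states → Pre_mask_to_states mask states → Spec_mask_to_states mask states (mask_to_states mask states)

-- ===== LEMMAS AND PROOFS =====

-- bit identities on Nat used to characterise A's lsb extraction
theorem pvAndEvenOdd (a b : Nat) : (2*a) &&& (2*b+1) = 2*(a &&& b) := by
  apply Nat.eq_of_testBit_eq; intro i
  cases i with
  | zero => simp [Nat.testBit_zero]
  | succ i =>
      have h1 : (2*a)/2 = a := by omega
      have h2 : (2*b+1)/2 = b := by omega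
      have h3 : (2*(a &&& b))/2 = a &&& b := by omega
      rw [Nat.testBit_and]
      simp [Nat.testBit_succ, h1, h2, h3, Nat.testBit_and]

theorem pvAndOddEven (a b : Nat) : (2*a+1) &&& (2*b) = 2*(a &&& b) := by
  apply Nat.eq_of_testBit_eq; intro i
  cases i with
  | zero => simp [Nat.testBit_zero]
  | succ i =>
      have h1 : (2*a+1)/2 = a := by omega
      have h2 : (2*b)/2 = b := by omega
      have h3 : (2*(a &&& b))/2 = a &&& b := by omega
      rw [Nat.testBit_and]
      simp [Nat.testBit_succ, h1, h2, h3, Nat.testBit_and]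

theorem pvXorOddEven (a b : Nat) : (2*a+1) ^^^ (2*b) = 2*(a ^^^ b)+1 := by
  apply Nat.eq_of_testBit_eq; intro i
  cases i with
  | zero => simp [Nat.testBit_zero]
  | succ i =>
      have h1 : (2*a+1)/2 = a := by omega
      have h2 : (2*b)/2 = b := by omega
      have h3 : (2*(a ^^^ b)+1)/2 = a ^^^ b := by omega
      rw [Nat.testBit_xor]
      simp [Nat.testBit_succ, h1, h2, h3, Nat.testBit_xor]

theorem pvXorEvenEven (a b : Nat) : (2*a) ^^^ (2*b) = 2*(a ^^^ b) := by
  apply Nat.eq_of_testBit_eq; intro i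
  cases i with
  | zero => simp [Nat.testBit_zero]
  | succ i =>
      have h1 : (2*a)/2 = a := by omega
      have h2 : (2*b)/2 = b := by omega
      have h3 : (2*(a ^^^ b))/2 = a ^^^ b := by omega
      rw [Nat.testBit_xor]
      simp [Nat.testBit_succ, h1, h2, h3, Nat.testBit_xor]

-- the value Python's `mask & -mask` computes, as a Nat expression
def pvLsb (m : Nat) : Nat := m - (m &&& (m-1))

theorem pvBandNeg (m : Nat) (h : 0 < m) : PySem.Int.band (m : Int) (-(m : Int)) = ((pvLsb m : Nat) : Int) := by
  have hp : (0:Int) ≤ (m : Int) := by omega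
  have hm : ¬ ((0:Int) ≤ -(m:Int)) := by omega
  have ht : (-(-(m:Int)) - 1).toNat = m - 1 := by omega
  rw [PySem.Int.band, if_pos hp, if_neg hm, ht]
  simp [pvLsb]

theorem pvAndLt (m : Nat) (h : 0 < m) : m &&& (m-1) < m := by
  have : m &&& (m-1) ≤ m - 1 := Nat.and_le_right
  omega

theorem pvAndDouble (a : Nat) (h : 0 < a) : (2*a) &&& (2*a-1) = 2*(a &&& (a-1)) := by
  have h1 : 2*a - 1 = 2*(a-1)+1 := by omega
  rw [h1, pvAndEvenOdd]

theorem pvAndOddPred (a : Nat) : (2*a+1) &&& (2*a+1-1) = 2*a := by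
  have h1 : 2*a+1-1 = 2*a := by omega
  rw [h1, pvAndOddEven, Nat.and_self]

theorem pvLsbXor (m : Nat) : pvLsb m = m ^^^ (m &&& (m-1)) := by
  induction m using Nat.strong_induction_on with
  | _ m ih =>
    rcases Nat.eq_zero_or_pos m with h0 | h0
    · simp [h0, pvLsb]
    rcases Nat.even_or_odd m with ⟨a, haa⟩ | ⟨a, haa⟩
    · have ha' : m = 2*a := by omega
      have hapos : 0 < a := by omega
      subst ha'
      have hand := pvAndDouble a hapos
      have hle : a &&& (a-1) ≤ a - 1 := Nat.and_le_right
      have hrec := ih a (by omega)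
      calc pvLsb (2*a) = 2*a - 2*(a &&& (a-1)) := by rw [pvLsb, hand]
        _ = 2*(a - (a &&& (a-1))) := by omega
        _ = 2*(a ^^^ (a &&& (a-1))) := by rw [← pvLsb, hrec]
        _ = (2*a) ^^^ (2*(a &&& (a-1))) := (pvXorEvenEven _ _).symm
        _ = (2*a) ^^^ ((2*a) &&& (2*a-1)) := by rw [← hand]
    · have ha' : m = 2*a+1 := by omega
      subst ha'
      have hand := pvAndOddPred a
      have hx : (2*a+1) ^^^ (2*a) = 1 := by
        rw [pvXorOddEven, Nat.xor_self]
      rw [pvLsb, hand, hx]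
      omega

theorem pvLsbPos (m : Nat) (h : 0 < m) : 0 < pvLsb m := by
  have : m &&& (m-1) ≤ m - 1 := Nat.and_le_right
  unfold pvLsb; omega

theorem pvBxorLsb (m : Nat) : m ^^^ pvLsb m = m &&& (m-1) := by
  rw [pvLsbXor, ← Nat.xor_assoc, Nat.xor_self, Nat.zero_xor]

-- the index sequence A's loop emits
def pvIlist (m : Nat) : List Nat :=
  if h : m = 0 then []
  else (PySem.Int.bitLength ((pvLsb m : Nat) : Int) - 1) :: pvIlist (m &&& (m-1))
termination_by m
decreasing_by exact pvAndLt m (Nat.pos_of_ne_zero h)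

theorem pvIlist_zero : pvIlist 0 = [] := by rw [pvIlist]; rfl

theorem pvIlist_pos (m : Nat) (h : m ≠ 0) :
    pvIlist m = (PySem.Int.bitLength ((pvLsb m : Nat) : Int) - 1) :: pvIlist (m &&& (m-1)) := by
  rw [pvIlist]; rw [dif_neg h]

-- the ascending list of set-bit positions, halving recursion
def pvBitIndices (m : Nat) : List Nat :=
  if h : m = 0 then []
  else (if m % 2 = 1 then [0] else []) ++ (pvBitIndices (m/2)).map (·+1)
termination_by m
decreasing_by exact Nat.div_lt_self (Nat.pos_of_ne_zero h) (by omega)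

theorem pvBitIndices_zero : pvBitIndices 0 = [] := by rw [pvBitIndices]; rfl

theorem pvBitIndices_pos (m : Nat) (h : m ≠ 0) :
    pvBitIndices m = (if m % 2 = 1 then [0] else []) ++ (pvBitIndices (m/2)).map (·+1) := by
  rw [pvBitIndices]; rw [dif_neg h]

theorem pvBitLengthPos (l : Nat) (h : 0 < l) : 0 < PySem.Int.bitLength (l : Int) := by
  by_contra hc
  have h0 : PySem.Int.bitLength (l : Int) = 0 := by omega
  have := PySem.Int.lt_two_pow_bitLength (l : Int)
  rw [h0] at this
  simp at this
  omega

theorem pvLsbDouble (a : Nat) (h : 0 < a) : pvLsb (2*a) = 2 * pvLsb a := by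
  have hand := pvAndDouble a h
  have hle : a &&& (a-1) ≤ a - 1 := Nat.and_le_right
  unfold pvLsb
  rw [hand]
  omega

theorem pvIlistShift (a : Nat) : pvIlist (2*a) = (pvIlist a).map (·+1) := by
  induction a using Nat.strong_induction_on with
  | _ a ih =>
    rcases Nat.eq_zero_or_pos a with h0 | h0
    · simp [h0, pvIlist_zero]
    rw [pvIlist_pos (2*a) (by omega), pvIlist_pos a (by omega), List.map_cons]
    have hlpos : 0 < pvLsb a := pvLsbPos a h0
    have hbl : PySem.Int.bitLength ((pvLsb (2*a) : Nat) : Int)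
        = PySem.Int.bitLength ((pvLsb a : Nat) : Int) + 1 := by
      rw [pvLsbDouble a h0]
      rw [PySem.Int.bitLength_natCast (m := 2 * pvLsb a) (by omega)]
      congr 2
      omega
    have hblpos := pvBitLengthPos (pvLsb a) hlpos
    rw [pvAndDouble a h0, ih (a &&& (a-1)) (pvAndLt a h0), hbl]
    congr 1
    omega

theorem pvIlistEq (m : Nat) : pvIlist m = pvBitIndices m := by
  induction m using Nat.strong_induction_on with
  | _ m ih =>
    rcases Nat.eq_zero_or_pos m with h0 | h0
    · simp [h0, pvIlist_zero, pvBitIndices_zero]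
    rcases Nat.even_or_odd m with ⟨a, haa⟩ | ⟨a, haa⟩
    · have ha' : m = 2*a := by omega
      have hapos : 0 < a := by omega
      subst ha'
      rw [pvIlistShift a, ih a (by omega), pvBitIndices_pos (2*a) (by omega)]
      have hmod : (2*a) % 2 = 0 := by omega
      have hdiv : (2*a) / 2 = a := by omega
      simp [hmod, hdiv]
    · have ha' : m = 2*a+1 := by omega
      subst ha'
      have hlsb : pvLsb (2*a+1) = 1 := by
        unfold pvLsb; rw [pvAndOddPred]; omega
      rw [pvIlist_pos (2*a+1) (by omega), hlsb, pvAndOddPred, pvIlistShift a, ih a (by omega)]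
      rw [pvBitIndices_pos (2*a+1) (by omega)]
      have hmod : (2*a+1) % 2 = 1 := by omega
      have hdiv : (2*a+1) / 2 = a := by omega
      have hb1 : PySem.Int.bitLength (1 : Int) - 1 = 0 := by decide
      simp [hmod, hdiv, hb1]

theorem pvLoopA (states : List String) :
    ∀ (fuel m : Nat) (i : Int) (out : List String), m < fuel →
      mtsLoopA states fuel (m : Int) i out
        = out ++ (pvIlist m).map (fun (j : Nat) => PySem.List.pyGetD states (j : Int) "") := by
  intro fuel
  induction fuel with
  | zero => intro m i out h; omega
  | succ fuel IH =>
    intro m i out h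
    rcases Nat.eq_zero_or_pos m with h0 | h0
    · subst h0; simp [mtsLoopA, pvIlist_zero]
    have hne : (m : Int) ≠ 0 := by exact_mod_cast (by omega : m ≠ 0)
    rw [mtsLoopA, if_pos hne, pvBandNeg m h0]
    have hx : PySem.Int.bxor (m : Int) ((pvLsb m : Nat) : Int) = ((m &&& (m-1) : Nat) : Int) := by
      rw [PySem.Int.bxor_natCast, pvBxorLsb]
    rw [hx, IH (m &&& (m-1)) (i+1) _ (by have := pvAndLt m h0; omega)]
    rw [pvIlist_pos m (by omega), List.map_cons]
    simp [List.append_assoc]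

-- B side: the bit positions picked out by filtering range n (any n with m < 2^n)
-- are exactly pvBitIndices m
theorem pvFilterRange : ∀ (n m : Nat), m < 2 ^ n →
    (List.range n).filter (fun k => m.testBit k) = pvBitIndices m := by
  intro n
  induction n with
  | zero =>
      intro m h
      have : m = 0 := by omega
      simp [this, pvBitIndices_zero]
  | succ n IH =>
      intro m h
      rcases Nat.eq_zero_or_pos m with h0 | h0
      · simp [h0, pvBitIndices_zero, Nat.zero_testBit]
      rw [List.range_succ_eq_map, List.filter_cons, List.filter_map]
      have htail : (List.range n).filter (fun k => m.testBit (k+1)) = pvBitIndices (m/2) := by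
        have : (fun k => m.testBit (k+1)) = (fun k => (m/2).testBit k) := by
          funext k; rw [Nat.testBit_add_one]
        rw [this]
        exact IH (m/2) (by omega)
      rw [pvBitIndices_pos m (by omega)]
      have hsucc : ((List.range n).filter (fun k => m.testBit (Nat.succ k))) = pvBitIndices (m/2) := htail
      by_cases hodd : m % 2 = 1
      · have hbit : m.testBit 0 = true := by simp [Nat.testBit_zero, hodd]
        simp only [Function.comp_def, Nat.succ_eq_add_one] at *
        rw [hbit, if_pos hodd, htail]
        rfl
      · have hbit : m.testBit 0 = false := by simp [Nat.testBit_zero, hodd]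
        simp only [Function.comp_def, Nat.succ_eq_add_one] at *
        rw [hbit, if_neg hodd, htail]
        rfl

theorem pvAltEq (m : Nat) (states : List String) :
    mask_to_states_alt (m : Int) states
      = (pvBitIndices m).map (fun (j : Nat) => PySem.List.pyGetD states (j : Int) "") := by
  unfold mask_to_states_alt
  have hbl : ((PySem.Int.bitLength (m : Int) : Int) - 0).toNat = PySem.Int.bitLength (m : Int) := by
    omega
  rw [PySem.List.pyRange_one, List.filter_map, List.map_map]
  have hpred : ((fun i : Int => PySem.Int.band (m : Int) ((2 : Int) ^ i.toNat) != 0) ∘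
        (fun k : Nat => (0 : Int) + k)) = (fun k : Nat => m.testBit k) := by
    funext k
    simp only [Function.comp_apply]
    have h0 : ((0 : Int) + (k : Int)).toNat = k := by omega
    rw [h0]
    have h2 : (2 : Int) ^ k = ((2 ^ k : Nat) : Int) := by push_cast; ring
    rw [h2, PySem.Int.band_natCast]
    have := Nat.and_two_pow m k
    by_cases hb : m.testBit k
    · simp [hb, this]
    · simp [hb, this]
  rw [hbl, hpred]
  have hfun : ((fun i : Int => PySem.List.pyGetD states i "") ∘ (fun k : Nat => (0 : Int) + k))
      = (fun (j : Nat) => PySem.List.pyGetD states (j : Int) "") := by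
    funext k; simp
  rw [hfun, pvFilterRange (PySem.Int.bitLength (m : Int)) m
        (by simpa using PySem.Int.lt_two_pow_bitLength (m : Int))]

-- ===== VERDICT (by name: the statement is the Claim_ definition above) =====
theorem mask_to_states_spec : Claim_equal_mask_to_states := by
  intro mask states _ hpre
  obtain ⟨hge, _⟩ := hpre
  unfold Spec_mask_to_states mask_to_states
  obtain ⟨m, rfl⟩ : ∃ m : Nat, mask = (m : Int) := ⟨mask.toNat, (Int.toNat_of_nonneg hge).symm⟩
  rw [Int.toNat_natCast, pvAltEq]
  have hz : (0:Int) = ((0:Nat) : Int) := by norm_num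
  rw [hz, pvLoopA states (m+1) m _ [] (by omega), pvIlistEq]
  simp
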